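-- pv_equiv track=rewrite | github.com/a-naoufel/Data-driven-Analysis-of-Football-Player-Performance | Scrapping/Scripts/Transfermarket/tfmkt_pipeline.py | filter_competitions
-- ===== SOURCE A (Python) =====
-- from typing import Iterable, Dict, Any, List, Set
-- import unicodedata
--
-- def norm(s: str) -> str:
--     if not isinstance(s, str):
--         return ""
--     s = unicodedata.normalize("NFKD", s)
--     s = "".join(ch for ch in s if not unicodedata.combining(ch))
--     s = s.replace("\u2013", "-").replace("\u2014", "-")
--     return " ".join(s.lower().split())
--
-- LEAGUE_SYNONYMS: Dict[str, Set[str]] = {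
--     # SoFIFA -> acceptable Transfermarkt competition names (normalized)
--     "ligue 1 uber eats": {"ligue 1"},
--     "ligue 2 bkt": {"ligue 2"},
--     "primeira liga": {"liga portugal", "liga portugal bwin", "primeira liga"},
--     "la liga": {"laliga", "primera division", "primera división"},
--     "la liga 2": {"laliga2", "segunda division", "segunda división", "laliga hypermotion"},
--     "scottish premiership": {"scottish premiership", "premiership"},
--     "belgian pro league": {"jupiler pro league", "pro league"},
--     "greek super league": {"super league", "super league 1", "super league greece"},
--     "saudi pro league": {"saudi professional league", "saudi pro league"},
--     "uae pro league": {"uae pro league", "arabian gulf league"},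
--     "major league soccer": {"major league soccer", "mls"},
--     "a-league men": {"a-league", "a-league men"},
-- }
--
-- def filter_competitions(all_comp: List[Dict[str, Any]], allowed_leagues: Set[str]) -> List[Dict[str, Any]]:
--     filtered = []
--     for c in all_comp:
--         name = c.get("name") or c.get("competition_name") or c.get("title") or ""
--         n = norm(name)
--         if n in allowed_leagues:
--             filtered.append(c)
--             continue
--         # syns
--         for base, syns in LEAGUE_SYNONYMS.items():
--             if base in allowed_leagues and n in syns:
--                 filtered.append(c)
--                 break
--     return filtered
-- ===== SOURCE B (Python) =====
-- from typing import Dict, Any, List, Set, Tuple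
-- import unicodedata
--
-- def norm(s: str) -> str:
--     if not isinstance(s, str):
--         return ""
--     s = unicodedata.normalize("NFKD", s)
--     s = "".join(ch for ch in s if not unicodedata.combining(ch))
--     s = s.replace("\u2013", "-").replace("\u2014", "-")
--     return " ".join(s.lower().split())
--
-- # LEAGUE_SYNONYMS flattened into (synonym, base) rows.
-- SYNONYM_PAIRS: List[Tuple[str, str]] = [
--     ("ligue 1", "ligue 1 uber eats"),
--     ("ligue 2", "ligue 2 bkt"),
--     ("liga portugal", "primeira liga"),
--     ("liga portugal bwin", "primeira liga"),
--     ("primeira liga", "primeira liga"),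
--     ("laliga", "la liga"),
--     ("primera division", "la liga"),
--     ("primera división", "la liga"),
--     ("laliga2", "la liga 2"),
--     ("segunda division", "la liga 2"),
--     ("segunda división", "la liga 2"),
--     ("laliga hypermotion", "la liga 2"),
--     ("scottish premiership", "scottish premiership"),
--     ("premiership", "scottish premiership"),
--     ("jupiler pro league", "belgian pro league"),
--     ("pro league", "belgian pro league"),
--     ("super league", "greek super league"),
--     ("super league 1", "greek super league"),
--     ("super league greece", "greek super league"),
--     ("saudi professional league", "saudi pro league"),
--     ("saudi pro league", "saudi pro league"),
--     ("uae pro league", "uae pro league"),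
--     ("arabian gulf league", "uae pro league"),
--     ("major league soccer", "major league soccer"),
--     ("mls", "major league soccer"),
--     ("a-league", "a-league men"),
--     ("a-league men", "a-league men"),
-- ]
--
-- def _name_of(c) -> str:
--     for k in ("name", "competition_name", "title"):
--         v = c.get(k)
--         if v:
--             return v
--     return ""
--
-- def filter_competitions(all_comp: List[Dict[str, Any]], allowed_leagues: Set[str]) -> List[Dict[str, Any]]:
--     extra = [syn for syn, base in SYNONYM_PAIRS if base in allowed_leagues]
--     def accept(c) -> bool:
--         n = norm(_name_of(c))
--         return n in allowed_leagues or n in extra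
--     return [c for c in all_comp if accept(c)]
-- ===== Notes on version B (the rewrite author's own statement) =====
-- stated objective: alternative
-- what changed: B flattens LEAGUE_SYNONYMS into a static (synonym, base) pair table, precomputes once per call the list of extra accepted names whose base is allowed, resolves the name by looping over the three keys with early return, and filters all_comp in one comprehension with two membership tests, instead of A's per-competition inner loop over the synonyms dict with break.
import Mathlib
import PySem

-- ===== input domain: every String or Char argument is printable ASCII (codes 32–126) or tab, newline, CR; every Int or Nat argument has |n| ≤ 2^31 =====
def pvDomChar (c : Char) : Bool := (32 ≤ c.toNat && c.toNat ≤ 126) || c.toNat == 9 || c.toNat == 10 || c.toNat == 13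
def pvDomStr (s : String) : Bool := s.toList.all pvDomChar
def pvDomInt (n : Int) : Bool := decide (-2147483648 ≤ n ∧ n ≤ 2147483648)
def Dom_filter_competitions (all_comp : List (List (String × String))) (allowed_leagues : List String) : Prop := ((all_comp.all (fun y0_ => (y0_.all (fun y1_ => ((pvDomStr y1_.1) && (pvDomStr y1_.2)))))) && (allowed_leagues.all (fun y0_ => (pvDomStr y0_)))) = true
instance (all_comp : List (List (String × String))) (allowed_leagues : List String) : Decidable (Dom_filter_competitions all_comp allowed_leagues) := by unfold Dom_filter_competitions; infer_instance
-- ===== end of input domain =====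

-- B flattens the synonym dict into a static (synonym, base) pair table, builds the list of extra
-- accepted names once per call, and filters in one pass with plain membership tests (objective:
-- alternative decomposition; A's per-competition inner loop over the dict disappears).

-- ===== PORT A =====
-- shared module helper norm: on the ASCII input domain, NFKD normalization, combining-mark
-- removal and the en/em-dash replacements are the identity, so norm(s) = " ".join(s.lower().split())
def pvNorm (s : String) : String := PySem.Str.join " " (PySem.Str.split₀ (PySem.Str.lower s))

-- dict .get on the association list (first match)
def pvGet (c : List (String × String)) (k : String) : Option String :=
  (c.find? (fun p => p.1 == k)).map (fun p => p.2)

-- Python truthiness of `c.get(k)`: None and "" are falsy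
def pvTruthy : Option String → Option String
  | some s => if s = "" then none else some s
  | none => none

-- name = c.get("name") or c.get("competition_name") or c.get("title") or ""
def pvName (c : List (String × String)) : String :=
  (((pvTruthy (pvGet c "name")).or
      (pvTruthy (pvGet c "competition_name"))).or
    (pvTruthy (pvGet c "title"))).getD ""

-- LEAGUE_SYNONYMS (dict insertion order; each value set as its literal's element list —
-- only membership in it is ever used)
def pvSyn : List (String × List String) :=
  [("ligue 1 uber eats", ["ligue 1"]),
   ("ligue 2 bkt", ["ligue 2"]),
   ("primeira liga", ["liga portugal", "liga portugal bwin", "primeira liga"]),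
   ("la liga", ["laliga", "primera division", "primera división"]),
   ("la liga 2", ["laliga2", "segunda division", "segunda división", "laliga hypermotion"]),
   ("scottish premiership", ["scottish premiership", "premiership"]),
   ("belgian pro league", ["jupiler pro league", "pro league"]),
   ("greek super league", ["super league", "super league 1", "super league greece"]),
   ("saudi pro league", ["saudi professional league", "saudi pro league"]),
   ("uae pro league", ["uae pro league", "arabian gulf league"]),
   ("major league soccer", ["major league soccer", "mls"]),
   ("a-league men", ["a-league", "a-league men"])]

-- A's inner loop: `for base, syns in LEAGUE_SYNONYMS.items(): if base in allowed and n in syns: … break`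
def pvSynLoop (allowed : List String) (n : String) : List (String × List String) → Bool
  | [] => false
  | (base, syns) :: rest =>
      if allowed.contains base && syns.contains n then true else pvSynLoop allowed n rest

def filter_competitions (all_comp : List (List (String × String))) (allowed_leagues : List String) : List (List (String × String)) :=
  all_comp.foldl (fun filtered c =>
    let n := pvNorm (pvName c)
    if allowed_leagues.contains n then filtered ++ [c]
    else if pvSynLoop allowed_leagues n pvSyn then filtered ++ [c]
    else filtered) []

-- ===== PORT B =====
-- SYNONYM_PAIRS: the synonym dict flattened into (synonym, base) rows (Source B module constant)
def synonymPairs : List (String × String) :=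
  [("ligue 1", "ligue 1 uber eats"),
   ("ligue 2", "ligue 2 bkt"),
   ("liga portugal", "primeira liga"),
   ("liga portugal bwin", "primeira liga"),
   ("primeira liga", "primeira liga"),
   ("laliga", "la liga"),
   ("primera division", "la liga"),
   ("primera división", "la liga"),
   ("laliga2", "la liga 2"),
   ("segunda division", "la liga 2"),
   ("segunda división", "la liga 2"),
   ("laliga hypermotion", "la liga 2"),
   ("scottish premiership", "scottish premiership"),
   ("premiership", "scottish premiership"),
   ("jupiler pro league", "belgian pro league"),
   ("pro league", "belgian pro league"),
   ("super league", "greek super league"),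
   ("super league 1", "greek super league"),
   ("super league greece", "greek super league"),
   ("saudi professional league", "saudi pro league"),
   ("saudi pro league", "saudi pro league"),
   ("uae pro league", "uae pro league"),
   ("arabian gulf league", "uae pro league"),
   ("major league soccer", "major league soccer"),
   ("mls", "major league soccer"),
   ("a-league", "a-league men"),
   ("a-league men", "a-league men")]

-- _name_of: `for k in ("name","competition_name","title"): v = c.get(k); if v: return v` / return ""
def nameOf (c : List (String × String)) : List String → String
  | [] => ""
  | k :: ks =>
      match (c.find? (fun p => p.1 == k)).map (fun p => p.2) with
      | some v => if v = "" then nameOf c ks else v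
      | none => nameOf c ks

-- extra = [syn for syn, base in SYNONYM_PAIRS if base in allowed_leagues]
def extraNames (allowed : List String) : List String :=
  (synonymPairs.filter (fun p => allowed.contains p.2)).map (fun p => p.1)

def filter_competitions_alt (all_comp : List (List (String × String))) (allowed_leagues : List String) : List (List (String × String)) :=
  let extra := extraNames allowed_leagues
  all_comp.filter (fun c =>
    let n := pvNorm (nameOf c ["name", "competition_name", "title"])
    allowed_leagues.contains n || extra.contains n)

-- ===== PRECONDITION & SPEC =====
def Spec_filter_competitions (all_comp : List (List (String × String))) (allowed_leagues : List String) (out : List (List (String × String))) : Prop := out = filter_competitions_alt all_comp allowed_leagues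
instance (all_comp : List (List (String × String))) (allowed_leagues : List String) (out : List (List (String × String))) : Decidable (Spec_filter_competitions all_comp allowed_leagues out) := by unfold Spec_filter_competitions; infer_instance

-- ===== CLAIM (what is proved, stated in full; the proofs are below) =====
def Claim_equal_filter_competitions : Prop := ∀ (all_comp : List (List (String × String))) (allowed_leagues : List String), Dom_filter_competitions all_comp allowed_leagues → Spec_filter_competitions all_comp allowed_leagues (filter_competitions all_comp allowed_leagues)

-- ===== LEMMAS AND PROOFS =====

-- B's key-loop name resolution equals A's `or` chain
theorem nameOf_eq (c : List (String × String)) :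
    nameOf c ["name", "competition_name", "title"] = pvName c := by
  simp only [nameOf, pvName, pvGet, pvTruthy]
  rcases h1 : (c.find? (fun p => p.1 == "name")).map (fun p => p.2) with _ | v1 <;>
    rcases h2 : (c.find? (fun p => p.1 == "competition_name")).map (fun p => p.2) with _ | v2 <;>
    rcases h3 : (c.find? (fun p => p.1 == "title")).map (fun p => p.2) with _ | v3 <;>
    simp [h1, h2, h3, Option.or] <;>
    split_ifs <;> simp_all

-- A's synonym loop characterised as an existential over the dict rows
theorem synLoop_iff (allowed : List String) (n : String) (L : List (String × List String)) :
    pvSynLoop allowed n L = true ↔ ∃ b ss, (b, ss) ∈ L ∧ b ∈ allowed ∧ n ∈ ss := by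
  induction L with
  | nil => simp [pvSynLoop]
  | cons p rest ih =>
      obtain ⟨b, ss⟩ := p
      by_cases h : allowed.contains b && ss.contains n
      · simp only [pvSynLoop, if_pos h]
        simp only [Bool.and_eq_true, List.contains_iff_mem] at h
        exact ⟨fun _ => ⟨b, ss, List.mem_cons_self .., h.1, h.2⟩, fun _ => trivial⟩
      · simp only [pvSynLoop, if_neg h, ih]
        simp only [Bool.and_eq_true, List.contains_iff_mem] at h
        constructor
        · rintro ⟨b', ss', hm, ha, hn⟩; exact ⟨b', ss', List.mem_cons_of_mem _ hm, ha, hn⟩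
        · rintro ⟨b', ss', hm, ha, hn⟩
          rcases List.mem_cons.mp hm with heq | hm'
          · cases heq; exact absurd ⟨ha, hn⟩ h
          · exact ⟨b', ss', hm', ha, hn⟩

-- B's flat pair table is exactly A's dict flattened row by row
theorem synonymPairs_flatten :
    synonymPairs = pvSyn.flatMap (fun p => p.2.map (fun s => (s, p.1))) := by rfl

-- hence the two membership tests agree
theorem extra_iff (allowed : List String) (n : String) :
    (extraNames allowed).contains n = pvSynLoop allowed n pvSyn := by
  rw [Bool.eq_iff_iff, List.contains_iff_mem, synLoop_iff]
  simp only [extraNames, synonymPairs_flatten, List.mem_map, List.mem_filter,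
    List.mem_flatMap, List.contains_iff_mem]
  aesop

-- ===== VERDICT (by name: the statement is the Claim_ definition above) =====
theorem filter_competitions_spec : Claim_equal_filter_competitions := by
  intro all_comp allowed _
  unfold Spec_filter_competitions filter_competitions filter_competitions_alt
  have hbody : ∀ (filtered : List (List (String × String))) (c : List (String × String)),
      (let n := pvNorm (pvName c)
       if allowed.contains n then filtered ++ [c]
       else if pvSynLoop allowed n pvSyn then filtered ++ [c]
       else filtered)
      = (if (let n := pvNorm (nameOf c ["name", "competition_name", "title"])
             allowed.contains n || (extraNames allowed).contains n) then filtered ++ [c]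
         else filtered) := by
    intro filtered c
    simp only [nameOf_eq, extra_iff]
    by_cases h1 : pvNorm (pvName c) ∈ allowed <;>
      by_cases h2 : pvSynLoop allowed (pvNorm (pvName c)) pvSyn = true <;>
      simp [h1, h2]
  calc all_comp.foldl (fun filtered c =>
        let n := pvNorm (pvName c)
        if allowed.contains n then filtered ++ [c]
        else if pvSynLoop allowed n pvSyn then filtered ++ [c]
        else filtered) []
      = all_comp.foldl (fun filtered c =>
          if (let n := pvNorm (nameOf c ["name", "competition_name", "title"])
              allowed.contains n || (extraNames allowed).contains n) then filtered ++ [c]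
          else filtered) [] := by
        congr 1; funext filtered c; exact hbody filtered c
    _ = [] ++ all_comp.filter (fun c =>
          let n := pvNorm (nameOf c ["name", "competition_name", "title"])
          allowed.contains n || (extraNames allowed).contains n) := by
        rw [PySem.List.foldl_append_if]; simp
    _ = _ := by simp
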